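-- pv_equiv track=rewrite | github.com/fducha/python | stepic/Algorhythms/step13.py | other_approach
-- ===== SOURCE A (Python) =====
-- def other_approach(nums: list) -> int:
--     counter = 0
--     # n = len(nums)
--     max = 0
--     # digits = {}
--     for n in nums:
--         if n > max:
--             max = n
--         else:
--             counter += 1
--         # digits.setdefault(n, 0)
--         # digits[n] += 1
--         # counter += len(list(filter(lambda x: x > n, digits.keys())))
--     return counter
-- ===== SOURCE B (Python) =====
-- def other_approach(nums: list) -> int:
--     # Two-pass: build prefix-maximum table (max seen BEFORE element i, seed 0),
--     # then count elements not exceeding their prefix maximum.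
--     prefix = [0]
--     for n in nums:
--         prefix.append(prefix[-1] if n <= prefix[-1] else n)
--     return sum(1 for i, n in enumerate(nums) if n <= prefix[i])
-- ===== Notes on version B (the rewrite author's own statement) =====
-- stated objective: alternative
-- what changed: Replaces the single interleaved loop that updates a running max while counting with two separate passes: first building a prefix-maximum table (seeded with 0), then counting elements not exceeding the max seen before them.
import Mathlib
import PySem

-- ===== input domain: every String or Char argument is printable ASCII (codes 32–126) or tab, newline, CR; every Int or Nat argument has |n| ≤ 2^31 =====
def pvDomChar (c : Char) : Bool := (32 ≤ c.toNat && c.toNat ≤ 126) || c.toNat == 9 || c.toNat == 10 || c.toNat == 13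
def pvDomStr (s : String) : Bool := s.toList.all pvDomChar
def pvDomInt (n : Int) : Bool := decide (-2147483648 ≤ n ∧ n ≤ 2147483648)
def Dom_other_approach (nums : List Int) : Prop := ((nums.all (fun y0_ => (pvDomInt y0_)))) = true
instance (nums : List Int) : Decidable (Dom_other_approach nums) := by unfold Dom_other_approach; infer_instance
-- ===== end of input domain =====

-- B replaces A's single interleaved loop (running max + counter) with two passes:
-- build a prefix-maximum table, then count elements not exceeding their prefix max.


-- ===== PORT A =====
-- single loop over nums with state (counter, max)
def other_approach (nums : List Int) : Int :=
  (nums.foldl (fun (s : Int × Int) n => if n > s.2 then (s.1, n) else (s.1 + 1, s.2)) (0, 0)).1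

-- ===== PORT B =====
-- prefix[-1] on the (always nonempty) table is its last element; getLast! is exact here
def pvPrefixTab (nums : List Int) : List Int :=
  nums.foldl (fun acc n => acc ++ [if n ≤ acc.getLast! then acc.getLast! else n]) [0]

-- sum over enumerate of the 0/1 indicator 'nums[i] ≤ prefix[i]'; zip truncates the unused last entry
def other_approach_alt (nums : List Int) : Int :=
  (((nums.zip (pvPrefixTab nums)).filter (fun p => p.1 ≤ p.2)).length : Int)

-- ===== PRECONDITION & SPEC =====
def Spec_other_approach (nums : List Int) (out : Int) : Prop := out = other_approach_alt nums
instance (nums : List Int) (out : Int) : Decidable (Spec_other_approach nums out) := by unfold Spec_other_approach; infer_instance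

-- ===== CLAIM (what is proved, stated in full; the proofs are below) =====
def Claim_equal_other_approach : Prop := ∀ (nums : List Int), Dom_other_approach nums → Spec_other_approach nums (other_approach nums)

-- ===== LEMMAS AND PROOFS =====

-- proof-side tail of the prefix table with seed m
def pvTl (m : Int) : List Int → List Int
  | [] => []
  | n :: t => (if n ≤ m then m else n) :: pvTl (if n ≤ m then m else n) t

theorem pv_last_concat (pre : List Int) (m : Int) : (pre ++ [m]).getLast! = m := by
  have h : (pre ++ [m]).getLast? = some m := by simp
  cases hl : pre ++ [m] with
  | nil => simp [hl] at h
  | cons a as =>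
    rw [hl] at h
    simp [List.getLast!, List.getLast?_eq_some_getLast] at h ⊢
    exact h

theorem pv_build (nums : List Int) : ∀ (pre : List Int) (m : Int),
    nums.foldl (fun acc n => acc ++ [if n ≤ acc.getLast! then acc.getLast! else n]) (pre ++ [m])
      = pre ++ [m] ++ pvTl m nums := by
  induction nums with
  | nil => simp [pvTl]
  | cons n t ih =>
    intro pre m
    simp only [List.foldl_cons, pv_last_concat pre m, pvTl]
    have := ih (pre ++ [m]) (if n ≤ m then m else n)
    simpa [List.append_assoc] using this

theorem pv_shift (t : List Int) : ∀ (c m : Int),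
    (t.foldl (fun (s : Int × Int) n => if n > s.2 then (s.1, n) else (s.1 + 1, s.2)) (c, m)).1
      = c + (t.foldl (fun (s : Int × Int) n => if n > s.2 then (s.1, n) else (s.1 + 1, s.2)) (0, m)).1 := by
  induction t with
  | nil => intro c m; simp
  | cons x xs ihx =>
    intro c m
    simp only [List.foldl_cons]
    by_cases hx : x > m
    · simp only [hx, if_true]
      exact ihx c x
    · simp only [hx, if_false]
      rw [ihx (c + 1), ihx (0 + 1)]
      ring

theorem pv_count (nums : List Int) : ∀ (m : Int),
    (((nums.zip (m :: pvTl m nums)).filter (fun p => p.1 ≤ p.2)).length : Int)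
      = (nums.foldl (fun (s : Int × Int) n => if n > s.2 then (s.1, n) else (s.1 + 1, s.2)) (0, m)).1 := by
  induction nums with
  | nil => intro m; simp
  | cons n t ih =>
    intro m
    by_cases h : n ≤ m
    · have hgt : ¬ n > m := not_lt.mpr h
      simp only [pvTl, List.zip_cons_cons, List.foldl_cons, h, if_true, hgt, if_false,
        List.filter_cons, decide_eq_true_eq]
      rw [List.length_cons, pv_shift t (0 + 1) m, ← ih m]
      push_cast; ring
    · have hgt : n > m := lt_of_not_ge h
      simp only [pvTl, List.zip_cons_cons, List.foldl_cons, h, if_false, hgt, if_true,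
        List.filter_cons, decide_eq_true_eq]
      exact ih n

-- ===== VERDICT (by name: the statement is the Claim_ definition above) =====
theorem other_approach_spec : Claim_equal_other_approach := by
  intro nums _
  show other_approach nums = other_approach_alt nums
  unfold other_approach other_approach_alt pvPrefixTab
  have hb := pv_build nums [] 0
  simp only [List.nil_append] at hb
  rw [hb]
  have h0 : ([0] ++ pvTl 0 nums : List Int) = 0 :: pvTl 0 nums := by simp
  rw [h0, pv_count nums 0]
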